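-- pv_equiv track=rewrite | github.com/MrBrantCode/unitest_baseline | mut_generate/mist_train_cf/cf_71260/solution.py | solve
-- ===== SOURCE A (Python) =====
-- def solve(n):
--     # Initializing fibonacci sequence list
--     fibo_seq = [0, 1] + [0] * (n-2)
--     # Generating the rest of the sequence
--     for i in range(2, n):
--         fibo_seq[i] = fibo_seq[i-1] + fibo_seq[i-2]
--
--     # Initializing cumulative sum list
--     cum_sum = [0] * n
--     # Generating the rest of the cumulative sum
--     for i in range(n):
--         cum_sum[i] = cum_sum[i-1] + fibo_seq[i] if i != 0 else fibo_seq[i]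
--
--     # Initializing sum of squares
--     sum_squares = 0
--     # Iterating over even indices and adding up their squares
--     for i in range(0, n, 2):
--         sum_squares += cum_sum[i] ** 2
--
--     return sum_squares
-- ===== SOURCE B (Python) =====
-- def _fib_pair(k):
--     # fast doubling: returns (F(k), F(k+1))
--     if k == 0:
--         return (0, 1)
--     a, b = _fib_pair(k // 2)
--     c = a * (2 * b - a)
--     d = a * a + b * b
--     if k % 2 == 0:
--         return (c, d)
--     return (d, c + d)
--
--
-- def solve(n):
--     # cum_sum[i] = F(i+2) - 1, so the answer is sum over the m = ceil(n/2) even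
--     # indices of (F(2k) - 1)^2, k = 1..m, which has the closed form
--     # (F(4m+2) - 2m - 1)/5 + m + 2 - 2*F(2m+1), with F(4m+2) = F(2m+1)*(2*F(2m)+F(2m+1)).
--     if n <= 0:
--         return 0
--     m = (n + 1) // 2
--     a, b = _fib_pair(2 * m)
--     return (b * (2 * a + b) - 2 * m - 1) // 5 + m + 2 - 2 * b
-- ===== Notes on version B (the rewrite author's own statement) =====
-- stated objective: faster
-- what changed: Replaced the three O(n) list-building loops (Fibonacci list, cumulative-sum list, sum of squares of even-index entries) by a closed form derived from Fibonacci identities (cum_sum[i] = F(i+2)-1, sum F(2k)^2 = (F(4m+2)-2m-1)/5), with F computed by fast doubling in O(log n) big-int multiplications.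
import Mathlib
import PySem

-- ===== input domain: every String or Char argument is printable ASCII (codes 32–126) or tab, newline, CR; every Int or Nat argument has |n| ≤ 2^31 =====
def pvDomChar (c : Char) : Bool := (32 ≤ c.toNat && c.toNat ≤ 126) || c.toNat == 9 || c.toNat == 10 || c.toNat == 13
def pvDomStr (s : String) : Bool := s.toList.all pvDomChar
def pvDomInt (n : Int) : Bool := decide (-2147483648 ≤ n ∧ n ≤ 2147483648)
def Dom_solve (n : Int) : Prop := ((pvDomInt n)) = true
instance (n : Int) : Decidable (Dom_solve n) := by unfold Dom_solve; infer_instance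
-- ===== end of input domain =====

-- B replaces A's three O(n) list-building loops by a closed form from Fibonacci
-- identities evaluated with fast doubling (measurably faster, asymptotically).

-- ===== PORT A =====
-- loop body of A's fibonacci-filling loop: fibo_seq[i] = fibo_seq[i-1] + fibo_seq[i-2]
def fstep (l : List Int) (i : Int) : List Int :=
  PySem.List.pySetD l i (PySem.List.pyGetD l (i - 1) 0 + PySem.List.pyGetD l (i - 2) 0)

-- loop body of A's cumulative-sum loop (fibo is the finished fibo_seq)
def cstep (fibo : List Int) (l : List Int) (i : Int) : List Int :=
  PySem.List.pySetD l i
    (if i ≠ 0 then PySem.List.pyGetD l (i - 1) 0 + PySem.List.pyGetD fibo i 0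
     else PySem.List.pyGetD fibo i 0)

def solve (n : Int) : Int :=
  let fibo_seq0 : List Int := [0, 1] ++ List.replicate (n - 2).toNat 0
  let fibo_seq : List Int := (PySem.List.pyRange 2 n 1).foldl fstep fibo_seq0
  let cum_sum : List Int :=
    (PySem.List.pyRange 0 n 1).foldl (cstep fibo_seq) (List.replicate n.toNat 0)
  (PySem.List.pyRange 0 n 2).foldl (fun s i => s + PySem.List.pyGetD cum_sum i 0 ^ 2) 0

-- ===== PORT B =====
-- fast doubling: fibPair k = (F(k), F(k+1))
def fibPair (k : Nat) : Int × Int :=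
  if _h : k = 0 then (0, 1)
  else
    let p := fibPair (k / 2)
    let c := p.1 * (2 * p.2 - p.1)
    let d := p.1 * p.1 + p.2 * p.2
    if k % 2 = 0 then (c, d) else (d, c + d)
termination_by k
decreasing_by exact Nat.div_lt_self (Nat.pos_of_ne_zero _h) one_lt_two

def solve_alt (n : Int) : Int :=
  if n ≤ 0 then 0
  else
    let m : Int := PySem.Int.floordiv (n + 1) 2
    let p := fibPair (2 * m).toNat
    PySem.Int.floordiv (p.2 * (2 * p.1 + p.2) - 2 * m - 1) 5 + m + 2 - 2 * p.2

-- ===== PRECONDITION & SPEC =====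
def Spec_solve (n : Int) (out : Int) : Prop := out = solve_alt n
instance (n : Int) (out : Int) : Decidable (Spec_solve n out) := by unfold Spec_solve; infer_instance

-- ===== CLAIM (what is proved, stated in full; the proofs are below) =====
def Claim_equal_solve : Prop := ∀ (n : Int), Dom_solve n → Spec_solve n (solve n)

-- ===== LEMMAS AND PROOFS =====

def F (k : Nat) : Int := Nat.fib k

def T (m : Nat) : Int := ((List.range m).map (fun k => (F (2 * k + 2) - 1) ^ 2)).sum

theorem F_add_two (k : Nat) : F (k + 2) = F (k + 1) + F k := by
  unfold F; push_cast [Nat.fib_add_two]; ring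

theorem F_two_mul (j : Nat) : F (2 * j) = F j * (2 * F (j + 1) - F j) := by
  have hle : Nat.fib j ≤ 2 * Nat.fib (j + 1) :=
    le_trans (Nat.fib_le_fib_succ) (by omega)
  have h := Nat.fib_two_mul j
  unfold F
  zify [hle] at h
  linarith [h]

theorem F_two_mul_add_one (j : Nat) : F (2 * j + 1) = F (j + 1) ^ 2 + F j ^ 2 := by
  have h := Nat.fib_two_mul_add_one j
  unfold F
  exact_mod_cast congrArg (Nat.cast : Nat → Int) h

theorem fibPair_eq (k : Nat) : fibPair k = (F k, F (k + 1)) := by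
  induction k using Nat.strong_induction_on with
  | _ k ih =>
    rw [fibPair]
    by_cases h : k = 0
    · subst h; simp [F]
    · have ihh := ih (k / 2) (Nat.div_lt_self (Nat.pos_of_ne_zero h) one_lt_two)
      simp only [h, dite_false, ihh]
      obtain ⟨j, hk | hk⟩ := Nat.even_or_odd' k <;> subst hk
      · rw [show 2 * j / 2 = j from by omega] at *
        simp only [show 2 * j % 2 = 0 from by omega, if_true, Prod.mk.injEq]
        refine ⟨(F_two_mul j).symm, ?_⟩
        rw [F_two_mul_add_one j]; ring
      · rw [show (2 * j + 1) / 2 = j from by omega] at *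
        simp only [show (2 * j + 1) % 2 = 1 from by omega,
          show (1 : Nat) ≠ 0 from by omega, if_false, Prod.mk.injEq]
        refine ⟨?_, ?_⟩
        · rw [F_two_mul_add_one j]; ring
        · rw [show 2 * j + 1 + 1 = (2 * j) + 2 from by ring, F_add_two (2 * j),
            F_two_mul j, F_two_mul_add_one j]; ring

theorem set_map_range (N j : Nat) (v : Int) (g g' : Nat → Int) (_hj : j < N)
    (hv : g' j = v) (hk : ∀ k, k ≠ j → g' k = g k) :
    ((List.range N).map g).set j v = (List.range N).map g' := by
  apply List.ext_getElem
  · simp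
  · intro i h1 h2
    simp only [List.getElem_set, List.getElem_map, List.getElem_range]
    by_cases hij : j = i
    · subst hij; simp [hv.symm]
    · simp [hij, hk i (fun he => hij he.symm)]

theorem getD_map_range_eq (N k : Nat) (g : Nat → Int) (hk : k < N) :
    PySem.List.pyGetD ((List.range N).map g) (k : Int) 0 = g k := by
  rw [PySem.List.pyGetD_natCast]
  rw [List.getD_eq_getElem?_getD]
  simp [hk]

theorem foldl_add_gen (l : List Int) (g : Int → Int) (s : Int) :
    l.foldl (fun s i => s + g i) s = s + (l.map g).sum := by
  induction l generalizing s with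
  | nil => simp
  | cons x xs ih => simp [ih]; ring

theorem init_eq (N : Nat) (hN : 2 ≤ N) :
    ([0, 1] ++ List.replicate (N - 2) (0 : Int))
      = (List.range N).map (fun k => if k < 2 then F k else 0) := by
  apply List.ext_getElem
  · simp; omega
  · intro i h1 h2
    simp only [List.getElem_map, List.getElem_range]
    match i, h1 with
    | 0, _ => simp [F]
    | 1, _ => simp [F]
    | (i + 2), h1 =>
      have : ¬ (i + 2 < 2) := by omega
      simp only [this, if_false]
      rw [List.getElem_append_right (by simp)]
      simp

theorem fibo_char (N : Nat) (hN : 2 ≤ N) (t : Nat) (ht : t ≤ N - 2) :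
    (PySem.List.pyRange 2 ((2 + t : Nat) : Int) 1).foldl fstep
        ([0, 1] ++ List.replicate (N - 2) 0)
      = (List.range N).map (fun k => if k < 2 + t then F k else 0) := by
  induction t with
  | zero =>
    rw [show (((2 + 0 : Nat) : Int)) = (2 : Int) by norm_num]
    rw [PySem.List.pyRange_one_eq_nil (le_refl 2)]
    simpa using init_eq N hN
  | succ t ih =>
    have ih' := ih (by omega)
    have hcast : (((2 + (t + 1) : Nat) : Int)) = ((2 + t : Nat) : Int) + 1 := by push_cast; ring
    rw [hcast, PySem.List.pyRange_one_succ_right (by push_cast; omega), List.foldl_append, ih']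
    simp only [List.foldl_cons, List.foldl_nil]
    unfold fstep
    have h1 : (((2 + t : Nat) : Int) - 1) = ((t + 1 : Nat) : Int) := by push_cast; ring
    have h2 : (((2 + t : Nat) : Int) - 2) = ((t : Nat) : Int) := by push_cast; ring
    rw [h1, h2]
    rw [getD_map_range_eq N (t + 1) _ (by omega), getD_map_range_eq N t _ (by omega)]
    simp only [show t + 1 < 2 + t from by omega, if_true, show t < 2 + t from by omega, if_true]
    rw [PySem.List.pySetD_natCast]
    apply set_map_range N (2 + t) _ _ _ (by omega)
    · simp only [show 2 + t < 2 + (t + 1) from by omega, if_true]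
      rw [show 2 + t = t + 2 from by ring, F_add_two]
    · intro k hk
      by_cases h : k < 2 + t
      · simp [h, show k < 2 + (t + 1) from by omega]
      · simp [h, show ¬ (k < 2 + (t + 1)) from by omega]

theorem cum_char (N : Nat) (hN : 1 ≤ N) (fibo : List Int)
    (hfib : ∀ k, k < N → PySem.List.pyGetD fibo (k : Int) 0 = F k)
    (t : Nat) (ht : t ≤ N) :
    (PySem.List.pyRange 0 ((t : Nat) : Int) 1).foldl (cstep fibo) (List.replicate N 0)
      = (List.range N).map (fun k => if k < t then F (k + 2) - 1 else 0) := by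
  induction t with
  | zero =>
    rw [show (((0 : Nat) : Int)) = (0 : Int) by norm_num]
    rw [PySem.List.pyRange_one_eq_nil (le_refl 0)]
    simp only [List.foldl_nil]
    apply List.ext_getElem
    · simp
    · intro i h1 h2; simp
  | succ t ih =>
    have ih' := ih (by omega)
    have hcast : (((t + 1 : Nat) : Int)) = ((t : Nat) : Int) + 1 := by push_cast; ring
    rw [hcast, PySem.List.pyRange_one_succ_right (by positivity), List.foldl_append, ih']
    simp only [List.foldl_cons, List.foldl_nil]
    unfold cstep
    rw [PySem.List.pySetD_natCast]
    by_cases h0 : t = 0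
    · subst h0
      rw [if_neg (by simp)]
      rw [hfib 0 (by exact_mod_cast (by omega : 0 < N))]
      apply set_map_range N 0 _ _ _ (by omega)
      · simp only [show (0 : Nat) < 0 + 1 from by omega, if_true]
        simp [F]
      · intro k hk
        simp [show ¬ (k < 0) from by omega, show (k < 0 + 1) ↔ k = 0 from by omega, hk]
    · have hne : ((t : Nat) : Int) ≠ 0 := by
        simp only [ne_eq, Nat.cast_eq_zero]; exact h0
      rw [if_pos hne]
      have h1 : (((t : Nat) : Int) - 1) = ((t - 1 : Nat) : Int) := by
        push_cast [Nat.cast_sub (by omega : 1 ≤ t)]; ring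
      rw [h1]
      rw [getD_map_range_eq N (t - 1) _ (by omega), hfib t (by omega)]
      simp only [show t - 1 < t from by omega, if_true]
      apply set_map_range N t _ _ _ (by omega)
      · simp only [show t < t + 1 from by omega, if_true]
        rw [show t - 1 + 2 = t + 1 from by omega, F_add_two]
        ring
      · intro k hk
        by_cases h : k < t
        · simp [h, show k < t + 1 from by omega]
        · simp [h, show ¬ (k < t + 1) from by omega]

theorem cassini (m : Nat) : F (2 * m + 1) * F (2 * m + 3) = F (2 * m + 2) ^ 2 + 1 := by
  induction m with
  | zero => simp [F]; decide
  | succ m ih =>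
    have e1 : 2 * (m + 1) + 1 = (2 * m + 1) + 2 := by ring
    have e2 : 2 * (m + 1) + 3 = (2 * m + 3) + 2 := by ring
    have e3 : 2 * (m + 1) + 2 = (2 * m + 2) + 2 := by ring
    have e4 : (2 * m + 3) = (2 * m + 1) + 2 := by ring
    have e5 : (2 * m + 2) = (2 * m) + 2 := by ring
    rw [e1, e2, e3, F_add_two (2 * m + 1), F_add_two (2 * m + 3), F_add_two (2 * m + 2)]
    rw [e4, F_add_two (2 * m + 1)] at ih ⊢
    rw [e5, F_add_two (2 * m)] at ih ⊢
    set x := F (2 * m)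
    set y := F (2 * m + 1)
    set z := F (2 * m + 2)
    linear_combination ih
  
theorem T_succ (m : Nat) : T (m + 1) = T m + (F (2 * m + 2) - 1) ^ 2 := by
  unfold T
  rw [List.range_succ, List.map_append, List.sum_append]
  simp

theorem identI (m : Nat) :
    F (2 * m + 1) * (2 * F (2 * m) + F (2 * m + 1)) - 2 * (m : Int) - 1
      = 5 * (T m - (m : Int) - 2 + 2 * F (2 * m + 1)) := by
  induction m with
  | zero => simp [F, T]
  | succ m ih =>
    have e1 : 2 * (m + 1) + 1 = (2 * m + 1) + 2 := by ring
    have e2 : 2 * (m + 1) = (2 * m) + 2 := by ring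
    rw [e1, e2, F_add_two (2 * m + 1), F_add_two (2 * m), T_succ]
    have hc := cassini m
    rw [show 2 * m + 3 = (2 * m + 1) + 2 from by ring, F_add_two (2 * m + 1)] at hc
    rw [show 2 * m + 2 = (2 * m) + 2 from by ring, F_add_two (2 * m)] at hc ⊢
    push_cast
    set x := F (2 * m)
    set y := F (2 * m + 1)
    linear_combination ih + (2 : Int) * hc

theorem floordiv_five_mul (q : Int) : PySem.Int.floordiv (5 * q) 5 = q := by
  rw [PySem.Int.floordiv_eq_ediv_of_pos (by norm_num)]
  exact Int.mul_ediv_cancel_left q (by norm_num)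

-- A on nonpositive n: every loop is empty, result 0
theorem solve_nonpos (n : Int) (hn : n ≤ 0) : solve n = 0 := by
  simp only [solve]
  rw [PySem.List.pyRange_one_eq_nil (by omega : n ≤ 2),
      PySem.List.pyRange_one_eq_nil (by omega : n ≤ 0)]
  rw [PySem.List.pyRange_of_pos 0 n (by norm_num)]
  simp [show ¬ ((0 : Int) < n) from by omega]

theorem solve_pos (N : Nat) (hN : 1 ≤ N) : solve (N : Int) = T ((N + 1) / 2) := by
  simp only [solve]
  -- fibonacci list access facts
  have hfib : ∀ k, k < N →
      PySem.List.pyGetD ((PySem.List.pyRange 2 ((N : Nat) : Int) 1).foldl fstep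
        ([0, 1] ++ List.replicate (((N : Nat) : Int) - 2).toNat 0)) (k : Int) 0 = F k := by
    intro k hk
    by_cases h2 : 2 ≤ N
    · have hrep : (((N : Nat) : Int) - 2).toNat = N - 2 := by omega
      have hfc := fibo_char N h2 (N - 2) (le_refl _)
      rw [show ((2 + (N - 2) : Nat) : Int) = ((N : Nat) : Int) from by push_cast; omega] at hfc
      rw [hrep, hfc, getD_map_range_eq N k _ hk]
      simp [show k < 2 + (N - 2) from by omega]
    · have hN1 : N = 1 := by omega
      subst hN1
      have hk0 : k = 0 := by omega
      subst hk0
      rw [PySem.List.pyRange_one_eq_nil (show ((1 : Nat) : Int) ≤ 2 from by norm_num)]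
      norm_num [F]
  -- cumulative list
  have hrepN : ((N : Nat) : Int).toNat = N := by simp
  have hcum := cum_char N hN _ hfib N (le_refl N)
  rw [hrepN, hcum]
  -- final sum over even indices
  rw [PySem.List.pyRange_of_pos 0 ((N : Nat) : Int) (by norm_num : (0:Int) < 2)]
  simp only [show (0 : Int) < ((N : Nat) : Int) from by exact_mod_cast hN, if_true]
  have hM : ((((N : Nat) : Int) - 0 + 2 - 1) / 2).toNat = (N + 1) / 2 := by omega
  rw [hM, foldl_add_gen, List.map_map, zero_add]
  unfold T
  apply congrArg List.sum
  apply List.map_congr_left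
  intro k hk
  have hkm : k < (N + 1) / 2 := List.mem_range.mp hk
  have h2k : 2 * k < N := by omega
  simp only [Function.comp]
  rw [show ((0 : Int) + 2 * (k : Int)) = (((2 * k : Nat) : Int)) from by push_cast; ring]
  rw [getD_map_range_eq N (2 * k) _ h2k]
  simp [h2k]

theorem solve_alt_pos (N : Nat) (hN : 1 ≤ N) : solve_alt (N : Int) = T ((N + 1) / 2) := by
  unfold solve_alt
  rw [if_neg (show ¬ ((N : Int) ≤ 0) from by exact_mod_cast by omega)]
  have hm : PySem.Int.floordiv ((N : Int) + 1) 2 = (((N + 1) / 2 : Nat) : Int) := by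
    rw [show ((N : Int) + 1) = (((N + 1 : Nat)) : Int) from by push_cast; ring,
        show ((2 : Int)) = (((2 : Nat)) : Int) from by norm_num]
    exact_mod_cast PySem.Int.floordiv_natCast (N + 1) 2
  simp only [hm]
  rw [show (2 * ((((N + 1) / 2 : Nat)) : Int)).toNat = 2 * ((N + 1) / 2) from by omega]
  rw [fibPair_eq (2 * ((N + 1) / 2))]
  rw [identI ((N + 1) / 2), floordiv_five_mul]
  ring

-- ===== VERDICT (by name: the statement is the Claim_ definition above) =====
theorem solve_spec : Claim_equal_solve := by
  unfold Claim_equal_solve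
  intro n _
  unfold Spec_solve
  by_cases hn : n ≤ 0
  · rw [solve_nonpos n hn]
    unfold solve_alt
    rw [if_pos hn]
  · have hn' : 1 ≤ n := by omega
    obtain ⟨N, rfl⟩ : ∃ N : Nat, n = (N : Int) := ⟨n.toNat, by omega⟩
    have hN : 1 ≤ N := by exact_mod_cast hn'
    rw [solve_pos N hN, solve_alt_pos N hN]
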